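-- pv_equiv track=rewrite | github.com/timjogorman/isrl-data-and-conversions | viewer.py | represent_instance
-- ===== SOURCE A (Python) =====
-- def represent_instance(document, predicate, candidates, role):
--     minsent = max(predicate[0]-10, 0)
--     maxsent = min(predicate[0]+10, len(document))
--     rep = []
--     for line_id, its_sentence in enumerate(document):
--         if line_id >= minsent and line_id <= maxsent:
--             each_sentence =its_sentence[:]
--             if line_id == predicate[0]:
--                 each_sentence[predicate[1]] = "<<<"+each_sentence[predicate[1]]
--                 each_sentence[predicate[2]] = each_sentence[predicate[2]]+' ('+role+')>>>'
--             for c in candidates: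
--                 if c[0] == line_id:
--                     each_sentence[c[1]] = "{{{{"+each_sentence[c[1]]
--                     each_sentence[c[2]] = each_sentence[c[2]]+"}}}}"
--             rep.append(each_sentence)
--     return "\n".join([" ".join(x) for x in rep])
-- ===== SOURCE B (Python) =====
-- def represent_instance(document, predicate, candidates, role):
--     lo = max(predicate[0] - 10, 0)
--     top = min(predicate[0] + 10, len(document) - 1)
--     if top < lo:
--         return ""
--     window = [document[i][:] for i in range(lo, top + 1)]
--     p0 = predicate[0]
--     if 0 <= p0 < len(document):
--         row = window[p0 - lo]
--         row[predicate[1]] = "<<<" + row[predicate[1]]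
--         row[predicate[2]] = row[predicate[2]] + ' (' + role + ')>>>'
--     for c in candidates:
--         if lo <= c[0] <= top:
--             row = window[c[0] - lo]
--             row[c[1]] = "{{{{" + row[c[1]]
--             row[c[2]] = row[c[2]] + "}}}}"
--     return "\n".join(" ".join(x) for x in window)
-- ===== Notes on version B (the rewrite author's own statement) =====
-- stated objective: alternative
-- what changed: Instead of enumerating every document line and rescanning the whole candidate list inside that loop, B slices the 21-line window once (with an early return when it is empty), applies the predicate markup directly to its line, and then makes one single pass over the candidates, indexing each into its window row.
import Mathlib
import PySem

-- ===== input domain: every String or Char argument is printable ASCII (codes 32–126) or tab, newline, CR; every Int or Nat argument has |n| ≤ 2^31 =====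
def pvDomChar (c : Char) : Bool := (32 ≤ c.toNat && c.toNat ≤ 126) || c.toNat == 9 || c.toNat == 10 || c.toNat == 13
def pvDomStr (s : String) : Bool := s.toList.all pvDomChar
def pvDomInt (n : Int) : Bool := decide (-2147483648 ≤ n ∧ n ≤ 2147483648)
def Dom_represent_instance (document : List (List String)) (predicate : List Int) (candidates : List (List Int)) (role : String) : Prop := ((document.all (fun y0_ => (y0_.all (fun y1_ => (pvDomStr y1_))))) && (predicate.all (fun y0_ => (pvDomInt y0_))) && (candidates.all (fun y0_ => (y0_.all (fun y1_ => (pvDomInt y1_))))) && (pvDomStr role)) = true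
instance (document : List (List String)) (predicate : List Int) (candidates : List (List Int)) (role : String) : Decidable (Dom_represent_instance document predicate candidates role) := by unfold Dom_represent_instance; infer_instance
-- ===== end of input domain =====

-- B replaces A's per-line enumerate-and-rescan-all-candidates loop by a slice of the window plus two
-- independent single passes (predicate markup, then one pass over candidates), with an early return for
-- an empty window (objective: alternative decomposition; not measured faster). Equivalence is about the
-- RETURN value (A copies each line before mutating, so neither program mutates its arguments).

-- ===== PORT A =====
-- the two marking statement pairs shared verbatim by both Python sources
def pvPredMark (predicate : List Int) (role : String) (s : List String) : List String :=
  let e1 := PySem.List.pySetD s (PySem.List.pyGetD predicate 1 0)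
              ("<<<" ++ PySem.List.pyGetD s (PySem.List.pyGetD predicate 1 0) "")
  PySem.List.pySetD e1 (PySem.List.pyGetD predicate 2 0)
    (PySem.List.pyGetD e1 (PySem.List.pyGetD predicate 2 0) "" ++ " (" ++ role ++ ")>>>")

def pvCandMark (c : List Int) (s : List String) : List String :=
  let e1 := PySem.List.pySetD s (PySem.List.pyGetD c 1 0)
              ("{{{{" ++ PySem.List.pyGetD s (PySem.List.pyGetD c 1 0) "")
  PySem.List.pySetD e1 (PySem.List.pyGetD c 2 0)
    (PySem.List.pyGetD e1 (PySem.List.pyGetD c 2 0) "" ++ "}}}}")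

def represent_instance (document : List (List String)) (predicate : List Int) (candidates : List (List Int)) (role : String) : String :=
  let minsent := max (PySem.List.pyGetD predicate 0 0 - 10) 0
  let maxsent := min (PySem.List.pyGetD predicate 0 0 + 10) (document.length : Int)
  let rep : List (List String) :=
    (PySem.List.enumerate document).foldl (fun rep p =>
      if minsent ≤ p.1 ∧ p.1 ≤ maxsent then
        let each₁ := if p.1 = PySem.List.pyGetD predicate 0 0 then pvPredMark predicate role p.2 else p.2
        let each₂ := candidates.foldl (fun e c =>
          if PySem.List.pyGetD c 0 0 = p.1 then pvCandMark c e else e) each₁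
        rep ++ [each₂]
      else rep) []
  PySem.Str.join "\n" (rep.map (fun x => PySem.Str.join " " x))

-- ===== PORT B =====
def represent_instance_alt (document : List (List String)) (predicate : List Int) (candidates : List (List Int)) (role : String) : String :=
  let p0 := PySem.List.pyGetD predicate 0 0
  let lo := max (p0 - 10) 0
  let top := min (p0 + 10) ((document.length : Int) - 1)
  if top < lo then "" else
    let window₀ := (PySem.List.pyRange lo (top + 1)).map (fun i => PySem.List.pyGetD document i [])
    let window₁ := if 0 ≤ p0 ∧ p0 < (document.length : Int) then
        PySem.List.pySetD window₀ (p0 - lo)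
          (pvPredMark predicate role (PySem.List.pyGetD window₀ (p0 - lo) []))
      else window₀
    let window₂ := candidates.foldl (fun w c =>
        if lo ≤ PySem.List.pyGetD c 0 0 ∧ PySem.List.pyGetD c 0 0 ≤ top then
          PySem.List.pySetD w (PySem.List.pyGetD c 0 0 - lo)
            (pvCandMark c (PySem.List.pyGetD w (PySem.List.pyGetD c 0 0 - lo) []))
        else w) window₁
    PySem.Str.join "\n" (window₂.map (fun x => PySem.Str.join " " x))

-- ===== PRECONDITION & SPEC =====
-- Pre_ excludes exactly the inputs on which Python A raises: an empty predicate (IndexError on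
-- predicate[0]); a too-short predicate or an out-of-range predicate[1]/predicate[2] when the
-- predicate line lies in the document; and, when the displayed window is nonempty, any candidate
-- that is empty, or too short / with out-of-range indices when its line lies in the window.
def Pre_represent_instance (document : List (List String)) (predicate : List Int) (candidates : List (List Int)) (role : String) : Prop :=
  predicate ≠ [] ∧
  (let p0 := PySem.List.pyGetD predicate 0 0
   let lo := max (p0 - 10) 0
   let top := min (p0 + 10) ((document.length : Int) - 1)
   ((0 ≤ p0 ∧ p0 < (document.length : Int)) →
      3 ≤ predicate.length ∧
      PySem.Raise.InRange (PySem.List.pyGetD document p0 []).length (PySem.List.pyGetD predicate 1 0) ∧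
      PySem.Raise.InRange (PySem.List.pyGetD document p0 []).length (PySem.List.pyGetD predicate 2 0)) ∧
   (lo ≤ top → ∀ c ∈ candidates, c ≠ [] ∧
      ((lo ≤ PySem.List.pyGetD c 0 0 ∧ PySem.List.pyGetD c 0 0 ≤ top) →
        3 ≤ c.length ∧
        PySem.Raise.InRange (PySem.List.pyGetD document (PySem.List.pyGetD c 0 0) []).length (PySem.List.pyGetD c 1 0) ∧
        PySem.Raise.InRange (PySem.List.pyGetD document (PySem.List.pyGetD c 0 0) []).length (PySem.List.pyGetD c 2 0))))

instance (document : List (List String)) (predicate : List Int) (candidates : List (List Int)) (role : String) : Decidable (Pre_represent_instance document predicate candidates role) := by unfold Pre_represent_instance; infer_instance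

def pvWitness_represent_instance : List (List String) × List Int × List (List Int) × String :=
  ([["a", "b"], ["c"]], [0, 0, 1], [[1, 0, 0]], "R")

def Spec_represent_instance (document : List (List String)) (predicate : List Int) (candidates : List (List Int)) (role : String) (out : String) : Prop := out = represent_instance_alt document predicate candidates role
instance (document : List (List String)) (predicate : List Int) (candidates : List (List Int)) (role : String) (out : String) : Decidable (Spec_represent_instance document predicate candidates role out) := by unfold Spec_represent_instance; infer_instance

-- ===== CLAIM (what is proved, stated in full; the proofs are below) =====
def Claim_equal_represent_instance : Prop := ∀ (document : List (List String)) (predicate : List Int) (candidates : List (List Int)) (role : String), Dom_represent_instance document predicate candidates role → Pre_represent_instance document predicate candidates role → Spec_represent_instance document predicate candidates role (represent_instance document predicate candidates role)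

-- ===== LEMMAS AND PROOFS =====

-- filtering a Nat range down to a half-open sub-interval
theorem pv_filter_range (n a b : Nat) :
    (List.range n).filter (fun k => decide (a ≤ k ∧ k < b)) =
      (List.range (min b n - a)).map (fun k => a + k) := by
  induction n with
  | zero => simp
  | succ n ih =>
    rw [List.range_succ, List.filter_append, ih]
    by_cases hb : n < b
    · by_cases ha : a ≤ n
      · have h1 : min b n = n := by omega
        have h2 : min b (n + 1) = n + 1 := by omega
        rw [h1, h2]
        have : n + 1 - a = (n - a) + 1 := by omega
        rw [this, List.range_succ, List.map_append]
        simp only [List.filter_cons, List.filter_nil, List.map_cons, List.map_nil]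
        have : (decide (a ≤ n ∧ n < b)) = true := by simp; omega
        rw [this]
        congr 1
        simp
        omega
      · have : min b (n+1) - a = min b n - a := by omega
        rw [this]
        simp
        omega
    · have : min b (n+1) - a = min b n - a := by omega
      rw [this]
      simp
      omega

-- the big row-indexed fold of B, length preservation
theorem pv_rowfold_length {β : Type} (key : β → Int) (mark : β → List String → List String)
    (lo top : Int) (cs : List β) (w : List (List String)) :
    (cs.foldl (fun w c =>
        if lo ≤ key c ∧ key c ≤ top then
          PySem.List.pySetD w (key c - lo) (mark c (PySem.List.pyGetD w (key c - lo) []))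
        else w) w).length = w.length := by
  induction cs generalizing w with
  | nil => rfl
  | cons c cs ih =>
    simp only [List.foldl_cons]
    split_ifs with h
    · rw [ih, PySem.List.length_pySetD]
    · exact ih w

-- B's candidate fold, read row-wise
theorem pv_rowfold_get {β : Type} (key : β → Int) (mark : β → List String → List String)
    (lo top : Int) (cs : List β) (w : List (List String))
    (hw : (w.length : Int) = top + 1 - lo) (j : Nat) (hj : (j : Int) < top + 1 - lo) :
    PySem.List.pyGetD (cs.foldl (fun w c =>
        if lo ≤ key c ∧ key c ≤ top then
          PySem.List.pySetD w (key c - lo) (mark c (PySem.List.pyGetD w (key c - lo) []))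
        else w) w) (j : Int) [] =
      cs.foldl (fun e c => if key c = lo + (j : Int) then mark c e else e)
        (PySem.List.pyGetD w (j : Int) []) := by
  induction cs generalizing w with
  | nil => rfl
  | cons c cs ih =>
    simp only [List.foldl_cons]
    by_cases h : lo ≤ key c ∧ key c ≤ top
    · rw [if_pos h]
      have hnn : 0 ≤ key c - lo := by omega
      have hkn : (key c - lo).toNat < w.length := by omega
      have hcast : key c - lo = ((key c - lo).toNat : Int) := by omega
      rw [hcast, ih _ (by rw [PySem.List.length_pySetD]; exact hw)]
      rw [PySem.List.pyGetD_pySetD_natCast _ _ _ _ _ hkn]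
      by_cases hj' : key c = lo + (j : Int)
      · have heq : j = (key c - lo).toNat := by omega
        rw [if_pos heq, if_pos hj', show (((key c - lo).toNat : Int)) = (j : Int) by omega]
      · have : j ≠ (key c - lo).toNat := by omega
        rw [if_neg this, if_neg hj']
    · rw [if_neg h]
      have : ¬ key c = lo + (j : Int) := by
        intro he; exact h ⟨by omega, by omega⟩
      rw [if_neg this]
      exact ih w hw

theorem pv_eq (document : List (List String)) (predicate : List Int) (candidates : List (List Int)) (role : String)
    (hpre : Pre_represent_instance document predicate candidates role) :
    represent_instance document predicate candidates role = represent_instance_alt document predicate candidates role := by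
  simp only [Pre_represent_instance] at hpre
  obtain ⟨-, hpred, hcand⟩ := hpre
  simp only [represent_instance, represent_instance_alt]
  set p0 := PySem.List.pyGetD predicate 0 0 with hp0
  set nI := (document.length : Int) with hnI
  set lo := max (p0 - 10) 0 with hlo'
  set top := min (p0 + 10) (nI - 1) with htop'
  have hlo : 0 ≤ lo := by omega
  have htopn : top + 1 ≤ nI := by omega
  rw [PySem.List.foldl_append_ite]
  rw [PySem.List.enumerate_eq_map_pyRange document []]
  rw [List.filter_map]
  have hlen : PySem.List.len document = nI := by simp [PySem.List.len, hnI]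
  rw [hlen]
  simp only [Function.comp_def]
  have hq : List.filter (fun j : Int => decide (lo ≤ j ∧ j ≤ min (p0 + 10) nI)) (PySem.List.pyRange 0 nI)
      = List.filter (fun j : Int => decide (lo ≤ j ∧ j ≤ top)) (PySem.List.pyRange 0 nI) := by
    apply List.filter_congr
    intro i hi
    rw [PySem.List.mem_pyRange_one] at hi
    simp only [decide_eq_decide]
    omega
  rw [hq, hnI, PySem.List.pyRange_zero_nat, List.filter_map, List.map_map]
  simp only [Function.comp_def]
  have hq2 : List.filter (fun k : Nat => decide (lo ≤ (k : Int) ∧ (k : Int) ≤ top)) (List.range document.length)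
      = List.filter (fun k : Nat => decide (lo.toNat ≤ k ∧ k < (top + 1).toNat)) (List.range document.length) := by
    apply List.filter_congr
    intro k _
    simp only [decide_eq_decide]
    omega
  rw [hq2, pv_filter_range, List.map_map]
  simp only [Function.comp_def]
  by_cases hwin : top < lo
  · rw [if_pos hwin]
    have hm : min (top + 1).toNat document.length - lo.toNat = 0 := by omega
    rw [hm]
    simp only [List.range_zero, List.map_nil]
    rfl
  · rw [if_neg hwin]
    apply congrArg
    apply congrArg
    set w0 := List.map (fun i => PySem.List.pyGetD document i []) (PySem.List.pyRange lo (top + 1)) with hw0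
    have hw0len : w0.length = (top + 1 - lo).toNat := by
      rw [hw0, List.length_map, PySem.List.length_pyRange_one]
    set w1 := (if 0 ≤ p0 ∧ p0 < (document.length : Int) then
        PySem.List.pySetD w0 (p0 - lo) (pvPredMark predicate role (PySem.List.pyGetD w0 (p0 - lo) []))
      else w0) with hw1
    have hw1len : w1.length = (top + 1 - lo).toNat := by
      rw [hw1]; split_ifs
      · rw [PySem.List.length_pySetD, hw0len]
      · exact hw0len
    have hm : min (top + 1).toNat document.length - lo.toNat = (top + 1 - lo).toNat := by omega
    rw [hm, List.nil_append]
    have hgd : ∀ (L : List (List String)) (j : Nat), j < L.length → L[j]! = PySem.List.pyGetD L (j : Int) [] := by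
      intro L j h
      rw [PySem.List.pyGetD_natCast, List.getD_eq_getElem?_getD, List.getElem?_eq_getElem h,
        getElem!_pos L j h]
      rfl
    apply List.ext_getElem
    · simp only [List.length_map, List.length_range]
      rw [pv_rowfold_length, hw1len]
    · intro j hj1 hj2
      have hj : j < (top + 1 - lo).toNat := by
        simpa only [List.length_map, List.length_range] using hj1
      simp only [List.getElem_map, List.getElem_range]
      rw [← getElem!_pos _ j hj2, hgd _ j hj2]
      rw [pv_rowfold_get (fun c => PySem.List.pyGetD c 0 0) pvCandMark lo top candidates w1
        (by rw [hw1len]; omega) j (by omega)]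
      have hstart : PySem.List.pyGetD w1 (j : Int) [] =
          (if lo + (j : Int) = p0 then
            pvPredMark predicate role (PySem.List.pyGetD document (lo + (j : Int)) [])
          else PySem.List.pyGetD document (lo + (j : Int)) []) := by
        rw [hw1]
        by_cases hf : 0 ≤ p0 ∧ p0 < (document.length : Int)
        · rw [if_pos hf]
          have hptop : (p0 - lo).toNat < w0.length := by rw [hw0len]; omega
          rw [show p0 - lo = (((p0 - lo).toNat : Nat) : Int) by omega]
          rw [PySem.List.pyGetD_pySetD_natCast _ _ _ _ _ hptop]
          by_cases hjp : j = (p0 - lo).toNat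
          · rw [if_pos hjp, if_pos (show lo + (j : Int) = p0 by omega)]
            rw [hw0, PySem.List.pyGetD_map_pyRange_one _ _ _ _ _
              (show (p0 - lo).toNat < (top + 1 - lo).toNat by omega)]
            rw [show lo + (((p0 - lo).toNat : Nat) : Int) = p0 by omega,
              show lo + (j : Int) = p0 by omega]
          · rw [if_neg hjp, if_neg (show ¬ lo + (j : Int) = p0 by omega)]
            rw [hw0, PySem.List.pyGetD_map_pyRange_one _ _ _ _ _ hj]
        · rw [if_neg hf]
          rw [hw0, PySem.List.pyGetD_map_pyRange_one _ _ _ _ _ hj]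
          rw [if_neg (show ¬ lo + (j : Int) = p0 by omega)]
      rw [hstart]
      rw [show ((lo.toNat + j : Nat) : Int) = lo + (j : Int) by omega]

-- ===== VERDICT (by name: the statement is the Claim_ definition above) =====
theorem represent_instance_spec : Claim_equal_represent_instance := by
  intro document predicate candidates role _ hpre
  exact pv_eq document predicate candidates role hpre
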